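-- pv_equiv track=rewrite | github.com/project-zelash/main-code | src/repository/execution/code_generation_coordinator.py | _get_extension_mapping
-- ===== SOURCE A (Python) =====
-- from typing import Dict, List, Any, Optional
--
-- def _get_extension_mapping(project_description: str, tech_stack: List[str]) -> Dict[str, str]:
--     """
--     Dynamically determine file extensions based on project description and tech stack.
--
--     Args:
--         project_description: Description of the project
--         tech_stack: List of technologies being used
--
--     Returns:
--         Dictionary mapping layers to appropriate file extensions
--     """
--     extension_map = {
--         "backend": "py",      # Default fallback
--         "frontend": "js",     # Default fallback
--         "design": "css",      # Default fallback
--         "middleware": "py"    # Default fallback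
--     }
--
--     # Convert to lowercase for easier matching
--     tech_stack_lower = [tech.lower() for tech in tech_stack]
--     description_lower = project_description.lower()
--
--     # Backend language detection
--     if any(tech in tech_stack_lower for tech in ["python", "fastapi", "flask", "django", "uvicorn"]):
--         extension_map["backend"] = "py"
--         extension_map["middleware"] = "py"
--     elif any(tech in tech_stack_lower for tech in ["node", "nodejs", "express", "nestjs"]):
--         extension_map["backend"] = "js"
--         extension_map["middleware"] = "js"
--     elif any(tech in tech_stack_lower for tech in ["typescript", "ts-node"]):
--         extension_map["backend"] = "ts"
--         extension_map["middleware"] = "ts"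
--     elif any(tech in tech_stack_lower for tech in ["java", "spring", "springboot"]):
--         extension_map["backend"] = "java"
--         extension_map["middleware"] = "java"
--     elif any(tech in tech_stack_lower for tech in ["c#", "csharp", "dotnet", ".net", "asp.net"]):
--         extension_map["backend"] = "cs"
--         extension_map["middleware"] = "cs"
--     elif any(tech in tech_stack_lower for tech in ["go", "golang", "gin", "fiber"]):
--         extension_map["backend"] = "go"
--         extension_map["middleware"] = "go"
--     elif any(tech in tech_stack_lower for tech in ["php", "laravel", "symfony"]):
--         extension_map["backend"] = "php"
--         extension_map["middleware"] = "php"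
--     elif any(tech in tech_stack_lower for tech in ["ruby", "rails", "sinatra"]):
--         extension_map["backend"] = "rb"
--         extension_map["middleware"] = "rb"
--
--     # Frontend language detection
--     if any(tech in tech_stack_lower for tech in ["react", "next", "nextjs"]):
--         if any(tech in tech_stack_lower for tech in ["typescript", "ts"]):
--             extension_map["frontend"] = "tsx"
--         else:
--             extension_map["frontend"] = "jsx"
--     elif any(tech in tech_stack_lower for tech in ["vue", "vuejs", "nuxt"]):
--         extension_map["frontend"] = "vue"
--     elif any(tech in tech_stack_lower for tech in ["angular", "ng"]):
--         extension_map["frontend"] = "ts"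
--     elif any(tech in tech_stack_lower for tech in ["svelte", "sveltekit"]):
--         extension_map["frontend"] = "svelte"
--     elif any(tech in tech_stack_lower for tech in ["typescript", "ts"]):
--         extension_map["frontend"] = "ts"
--     elif any(tech in tech_stack_lower for tech in ["javascript", "js", "vanilla"]):
--         extension_map["frontend"] = "js"
--     elif any(tech in tech_stack_lower for tech in ["html", "css", "static"]):
--         extension_map["frontend"] = "html"
--
--     # Design/styling detection
--     if any(tech in tech_stack_lower for tech in ["scss", "sass"]):
--         extension_map["design"] = "scss"
--     elif any(tech in tech_stack_lower for tech in ["less"]):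
--         extension_map["design"] = "less"
--     elif any(tech in tech_stack_lower for tech in ["stylus"]):
--         extension_map["design"] = "styl"
--     elif any(tech in tech_stack_lower for tech in ["tailwind", "tailwindcss"]):
--         extension_map["design"] = "css"  # Tailwind still uses CSS files
--
--     # Special case handling based on project description
--     if "mobile" in description_lower:
--         if any(tech in tech_stack_lower for tech in ["react native", "expo"]):
--             extension_map["frontend"] = "tsx" if "typescript" in tech_stack_lower else "jsx"
--         elif any(tech in tech_stack_lower for tech in ["flutter", "dart"]):
--             extension_map["frontend"] = "dart"
--         elif any(tech in tech_stack_lower for tech in ["kotlin", "android"]):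
--             extension_map["frontend"] = "kt"
--         elif any(tech in tech_stack_lower for tech in ["swift", "ios"]):
--             extension_map["frontend"] = "swift"
--
--     return extension_map
-- ===== SOURCE B (Python) =====
-- # Inverted keyword index + one-pass arg-min: instead of scanning the tech
-- # stack once per keyword cascade, look each tech up in a keyword->rules index
-- # and keep, per section, the lowest-priority (= highest-precedence) match.
-- _INDEX = {
--     "python": {"backend": (0, "py")},
--     "fastapi": {"backend": (0, "py")},
--     "flask": {"backend": (0, "py")},
--     "django": {"backend": (0, "py")},
--     "uvicorn": {"backend": (0, "py")},
--     "node": {"backend": (1, "js")},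
--     "nodejs": {"backend": (1, "js")},
--     "express": {"backend": (1, "js")},
--     "nestjs": {"backend": (1, "js")},
--     "typescript": {"backend": (2, "ts"), "frontend": (4, "ts"),
--                    "ts_any": (0, ""), "ts_strict": (0, "")},
--     "ts-node": {"backend": (2, "ts")},
--     "java": {"backend": (3, "java")},
--     "spring": {"backend": (3, "java")},
--     "springboot": {"backend": (3, "java")},
--     "c#": {"backend": (4, "cs")},
--     "csharp": {"backend": (4, "cs")},
--     "dotnet": {"backend": (4, "cs")},
--     ".net": {"backend": (4, "cs")},
--     "asp.net": {"backend": (4, "cs")},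
--     "go": {"backend": (5, "go")},
--     "golang": {"backend": (5, "go")},
--     "gin": {"backend": (5, "go")},
--     "fiber": {"backend": (5, "go")},
--     "php": {"backend": (6, "php")},
--     "laravel": {"backend": (6, "php")},
--     "symfony": {"backend": (6, "php")},
--     "ruby": {"backend": (7, "rb")},
--     "rails": {"backend": (7, "rb")},
--     "sinatra": {"backend": (7, "rb")},
--     "react": {"frontend": (0, "jsx")},
--     "next": {"frontend": (0, "jsx")},
--     "nextjs": {"frontend": (0, "jsx")},
--     "vue": {"frontend": (1, "vue")},
--     "vuejs": {"frontend": (1, "vue")},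
--     "nuxt": {"frontend": (1, "vue")},
--     "angular": {"frontend": (2, "ts")},
--     "ng": {"frontend": (2, "ts")},
--     "svelte": {"frontend": (3, "svelte")},
--     "sveltekit": {"frontend": (3, "svelte")},
--     "ts": {"frontend": (4, "ts"), "ts_any": (0, "")},
--     "javascript": {"frontend": (5, "js")},
--     "js": {"frontend": (5, "js")},
--     "vanilla": {"frontend": (5, "js")},
--     "html": {"frontend": (6, "html")},
--     "css": {"frontend": (6, "html")},
--     "static": {"frontend": (6, "html")},
--     "scss": {"design": (0, "scss")},
--     "sass": {"design": (0, "scss")},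
--     "less": {"design": (1, "less")},
--     "stylus": {"design": (2, "styl")},
--     "tailwind": {"design": (3, "css")},
--     "tailwindcss": {"design": (3, "css")},
--     "react native": {"mobile": (0, "jsx")},
--     "expo": {"mobile": (0, "jsx")},
--     "flutter": {"mobile": (1, "dart")},
--     "dart": {"mobile": (1, "dart")},
--     "kotlin": {"mobile": (2, "kt")},
--     "android": {"mobile": (2, "kt")},
--     "swift": {"mobile": (3, "swift")},
--     "ios": {"mobile": (3, "swift")},
-- }
--
--
-- def _get_extension_mapping(project_description, tech_stack):
--     """One pass over the tech stack: per section keep the best (lowest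
--     priority) matching rule found via the inverted keyword index."""
--     best = {}
--     for tech in tech_stack:
--         for sec, (prio, ext) in _INDEX.get(tech.lower(), {}).items():
--             if sec not in best or prio < best[sec][0]:
--                 best[sec] = (prio, ext)
--
--     backend = best["backend"][1] if "backend" in best else "py"
--
--     if "frontend" in best:
--         p, e = best["frontend"]
--         frontend = ("tsx" if "ts_any" in best else "jsx") if p == 0 else e
--     else:
--         frontend = "js"
--
--     design = best["design"][1] if "design" in best else "css"
--
--     if "mobile" in project_description.lower() and "mobile" in best:
--         p, e = best["mobile"]
--         frontend = ("tsx" if "ts_strict" in best else "jsx") if p == 0 else e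
--
--     return {"backend": backend, "frontend": frontend,
--             "design": design, "middleware": backend}
-- ===== Notes on version B (the rewrite author's own statement) =====
-- stated objective: faster
-- what changed: Replaces A's four ordered if/elif keyword cascades (each scanning the tech list once per keyword) by an inverted keyword->rules index consulted in one pass over the tech stack, keeping per section the minimum-priority match (arg-min accumulator) and resolving extensions afterwards.
import Mathlib
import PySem

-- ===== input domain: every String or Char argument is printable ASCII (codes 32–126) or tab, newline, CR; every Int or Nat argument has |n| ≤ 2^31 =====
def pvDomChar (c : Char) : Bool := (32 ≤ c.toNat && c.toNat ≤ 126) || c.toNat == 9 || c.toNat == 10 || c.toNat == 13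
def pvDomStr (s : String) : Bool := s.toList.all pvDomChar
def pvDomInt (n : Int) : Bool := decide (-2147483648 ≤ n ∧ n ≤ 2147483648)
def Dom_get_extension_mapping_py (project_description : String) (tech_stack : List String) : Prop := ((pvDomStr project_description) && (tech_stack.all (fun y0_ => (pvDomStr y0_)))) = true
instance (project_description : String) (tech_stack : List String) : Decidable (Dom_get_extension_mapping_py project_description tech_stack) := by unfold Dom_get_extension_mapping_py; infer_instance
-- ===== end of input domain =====

-- B replaces A's four ordered if/elif keyword cascades by an inverted
-- keyword→rules index consulted in one pass over the tech stack with a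
-- per-section minimum-priority accumulator (objective: faster; measured).

-- ===== PORT A =====
-- any(tech in tech_stack_lower for tech in kws)
def pvAnyIn (kws : List String) (tsl : List String) : Bool :=
  kws.any (fun t => tsl.contains t)

def get_extension_mapping_py (project_description : String) (tech_stack : List String) : List (String × String) :=
  let d0 : PySem.Dict String String :=
    PySem.Dict.ofList [("backend", "py"), ("frontend", "js"), ("design", "css"), ("middleware", "py")]
  let tsl := tech_stack.map PySem.Str.lower
  let dl := PySem.Str.lower project_description
  -- backend / middleware cascade
  let d1 :=
    if pvAnyIn ["python", "fastapi", "flask", "django", "uvicorn"] tsl then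
      (d0.insert "backend" "py").insert "middleware" "py"
    else if pvAnyIn ["node", "nodejs", "express", "nestjs"] tsl then
      (d0.insert "backend" "js").insert "middleware" "js"
    else if pvAnyIn ["typescript", "ts-node"] tsl then
      (d0.insert "backend" "ts").insert "middleware" "ts"
    else if pvAnyIn ["java", "spring", "springboot"] tsl then
      (d0.insert "backend" "java").insert "middleware" "java"
    else if pvAnyIn ["c#", "csharp", "dotnet", ".net", "asp.net"] tsl then
      (d0.insert "backend" "cs").insert "middleware" "cs"
    else if pvAnyIn ["go", "golang", "gin", "fiber"] tsl then
      (d0.insert "backend" "go").insert "middleware" "go"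
    else if pvAnyIn ["php", "laravel", "symfony"] tsl then
      (d0.insert "backend" "php").insert "middleware" "php"
    else if pvAnyIn ["ruby", "rails", "sinatra"] tsl then
      (d0.insert "backend" "rb").insert "middleware" "rb"
    else d0
  -- frontend cascade
  let d2 :=
    if pvAnyIn ["react", "next", "nextjs"] tsl then
      (if pvAnyIn ["typescript", "ts"] tsl then d1.insert "frontend" "tsx"
       else d1.insert "frontend" "jsx")
    else if pvAnyIn ["vue", "vuejs", "nuxt"] tsl then d1.insert "frontend" "vue"
    else if pvAnyIn ["angular", "ng"] tsl then d1.insert "frontend" "ts"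
    else if pvAnyIn ["svelte", "sveltekit"] tsl then d1.insert "frontend" "svelte"
    else if pvAnyIn ["typescript", "ts"] tsl then d1.insert "frontend" "ts"
    else if pvAnyIn ["javascript", "js", "vanilla"] tsl then d1.insert "frontend" "js"
    else if pvAnyIn ["html", "css", "static"] tsl then d1.insert "frontend" "html"
    else d1
  -- design cascade
  let d3 :=
    if pvAnyIn ["scss", "sass"] tsl then d2.insert "design" "scss"
    else if pvAnyIn ["less"] tsl then d2.insert "design" "less"
    else if pvAnyIn ["stylus"] tsl then d2.insert "design" "styl"
    else if pvAnyIn ["tailwind", "tailwindcss"] tsl then d2.insert "design" "css"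
    else d2
  -- mobile special case
  let d4 :=
    if PySem.Str.isIn "mobile" dl then
      (if pvAnyIn ["react native", "expo"] tsl then
        d3.insert "frontend" (if tsl.contains "typescript" then "tsx" else "jsx")
      else if pvAnyIn ["flutter", "dart"] tsl then d3.insert "frontend" "dart"
      else if pvAnyIn ["kotlin", "android"] tsl then d3.insert "frontend" "kt"
      else if pvAnyIn ["swift", "ios"] tsl then d3.insert "frontend" "swift"
      else d3)
    else d3
  d4.items

-- ===== PORT B =====
-- _INDEX.get(t, {}).items() : for each keyword the (section, (priority, ext)) rules it matches
def pvIndex : String → List (String × Int × String)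
  | "python" => [("backend", 0, "py")]
  | "fastapi" => [("backend", 0, "py")]
  | "flask" => [("backend", 0, "py")]
  | "django" => [("backend", 0, "py")]
  | "uvicorn" => [("backend", 0, "py")]
  | "node" => [("backend", 1, "js")]
  | "nodejs" => [("backend", 1, "js")]
  | "express" => [("backend", 1, "js")]
  | "nestjs" => [("backend", 1, "js")]
  | "typescript" => [("backend", 2, "ts"), ("frontend", 4, "ts"), ("ts_any", 0, ""), ("ts_strict", 0, "")]
  | "ts-node" => [("backend", 2, "ts")]
  | "java" => [("backend", 3, "java")]
  | "spring" => [("backend", 3, "java")]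
  | "springboot" => [("backend", 3, "java")]
  | "c#" => [("backend", 4, "cs")]
  | "csharp" => [("backend", 4, "cs")]
  | "dotnet" => [("backend", 4, "cs")]
  | ".net" => [("backend", 4, "cs")]
  | "asp.net" => [("backend", 4, "cs")]
  | "go" => [("backend", 5, "go")]
  | "golang" => [("backend", 5, "go")]
  | "gin" => [("backend", 5, "go")]
  | "fiber" => [("backend", 5, "go")]
  | "php" => [("backend", 6, "php")]
  | "laravel" => [("backend", 6, "php")]
  | "symfony" => [("backend", 6, "php")]
  | "ruby" => [("backend", 7, "rb")]
  | "rails" => [("backend", 7, "rb")]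
  | "sinatra" => [("backend", 7, "rb")]
  | "react" => [("frontend", 0, "jsx")]
  | "next" => [("frontend", 0, "jsx")]
  | "nextjs" => [("frontend", 0, "jsx")]
  | "vue" => [("frontend", 1, "vue")]
  | "vuejs" => [("frontend", 1, "vue")]
  | "nuxt" => [("frontend", 1, "vue")]
  | "angular" => [("frontend", 2, "ts")]
  | "ng" => [("frontend", 2, "ts")]
  | "svelte" => [("frontend", 3, "svelte")]
  | "sveltekit" => [("frontend", 3, "svelte")]
  | "ts" => [("frontend", 4, "ts"), ("ts_any", 0, "")]
  | "javascript" => [("frontend", 5, "js")]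
  | "js" => [("frontend", 5, "js")]
  | "vanilla" => [("frontend", 5, "js")]
  | "html" => [("frontend", 6, "html")]
  | "css" => [("frontend", 6, "html")]
  | "static" => [("frontend", 6, "html")]
  | "scss" => [("design", 0, "scss")]
  | "sass" => [("design", 0, "scss")]
  | "less" => [("design", 1, "less")]
  | "stylus" => [("design", 2, "styl")]
  | "tailwind" => [("design", 3, "css")]
  | "tailwindcss" => [("design", 3, "css")]
  | "react native" => [("mobile", 0, "jsx")]
  | "expo" => [("mobile", 0, "jsx")]
  | "flutter" => [("mobile", 1, "dart")]
  | "dart" => [("mobile", 1, "dart")]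
  | "kotlin" => [("mobile", 2, "kt")]
  | "android" => [("mobile", 2, "kt")]
  | "swift" => [("mobile", 3, "swift")]
  | "ios" => [("mobile", 3, "swift")]
  | _ => []

-- if sec not in best or prio < best[sec][0]: best[sec] = (prio, ext)
def pvUpd (best : PySem.Dict String (Int × String)) (e : String × Int × String) : PySem.Dict String (Int × String) :=
  match best.get? e.1 with
  | none => best.insert e.1 e.2
  | some pe => if e.2.1 < pe.1 then best.insert e.1 e.2 else best

-- one iteration of the outer 'for tech in tech_stack' loop
def pvStep (best : PySem.Dict String (Int × String)) (tech : String) : PySem.Dict String (Int × String) :=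
  (pvIndex (PySem.Str.lower tech)).foldl pvUpd best

def get_extension_mapping_py_alt (project_description : String) (tech_stack : List String) : List (String × String) :=
  let best := tech_stack.foldl pvStep (PySem.Dict.mk [])
  let backend := match best.get? "backend" with
    | some pe => pe.2
    | none => "py"
  let frontend0 := match best.get? "frontend" with
    | some pe => if pe.1 == 0 then (if (best.get? "ts_any").isSome then "tsx" else "jsx") else pe.2
    | none => "js"
  let design := match best.get? "design" with
    | some pe => pe.2
    | none => "css"
  let frontend :=
    if PySem.Str.isIn "mobile" (PySem.Str.lower project_description) then
      match best.get? "mobile" with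
      | some pe => if pe.1 == 0 then (if (best.get? "ts_strict").isSome then "tsx" else "jsx") else pe.2
      | none => frontend0
    else frontend0
  [("backend", backend), ("frontend", frontend), ("design", design), ("middleware", backend)]

-- ===== PRECONDITION & SPEC =====
def Spec_get_extension_mapping_py (project_description : String) (tech_stack : List String) (out : List (String × String)) : Prop := out = get_extension_mapping_py_alt project_description tech_stack
instance (project_description : String) (tech_stack : List String) (out : List (String × String)) : Decidable (Spec_get_extension_mapping_py project_description tech_stack out) := by unfold Spec_get_extension_mapping_py; infer_instance

-- ===== CLAIM (what is proved, stated in full; the proofs are below) =====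
def Claim_equal_get_extension_mapping_py : Prop := ∀ (project_description : String) (tech_stack : List String), Dom_get_extension_mapping_py project_description tech_stack → Spec_get_extension_mapping_py project_description tech_stack (get_extension_mapping_py project_description tech_stack)

-- ===== LEMMAS AND PROOFS =====
def pvOMin : Option (Int × String) → Option (Int × String) → Option (Int × String)
  | none, b => b
  | some a, none => some a
  | some a, some b => if b.1 < a.1 then some b else some a

theorem pvOMin_none_right (a : Option (Int × String)) : pvOMin a none = a := by
  cases a <;> rfl

theorem pvOMin_assoc (a b c : Option (Int × String)) :
    pvOMin (pvOMin a b) c = pvOMin a (pvOMin b c) := by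
  cases a with
  | none => rfl
  | some pa =>
    cases b with
    | none => rfl
    | some pb =>
      cases c with
      | none => simp [pvOMin_none_right]
      | some pc =>
        by_cases h1 : pb.1 < pa.1 <;> by_cases h2 : pc.1 < pb.1 <;>
          by_cases h3 : pc.1 < pa.1 <;> simp [pvOMin, h1, h2, h3] <;> omega

theorem pvIndex_keys_nodup (t : String) : ((pvIndex t).map Prod.fst).Nodup := by
  unfold pvIndex; split <;> decide

theorem pvLookup_eq_none {ν : Type} (l : List (String × ν)) (s : String)
    (h : s ∉ l.map Prod.fst) : List.lookup s l = none := by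
  induction l with
  | nil => rfl
  | cons e rest ih =>
      simp only [List.map_cons, List.mem_cons, not_or] at h
      simp [List.lookup, (by simp [h.1] : (s == e.1) = false), ih h.2]

theorem pvUpd_get (d : PySem.Dict String (Int × String)) (e : String × Int × String) (s : String) :
    (pvUpd d e).get? s = if s = e.1 then pvOMin (d.get? s) (some e.2) else d.get? s := by
  unfold pvUpd
  by_cases hs : s = e.1
  · subst hs
    cases h : d.get? e.1 with
    | none => simp [pvOMin, PySem.Dict.get?_insert_self]
    | some pe =>
        simp only [pvOMin]
        split_ifs <;> simp [PySem.Dict.get?_insert_self, h]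
  · cases h : d.get? e.1 with
    | none => simp [hs, PySem.Dict.get?_insert_of_ne _ _ hs]
    | some pe =>
        simp only [if_neg hs]
        split_ifs <;> simp [PySem.Dict.get?_insert_of_ne _ _ hs]

theorem pvFoldUpd_get (entries : List (String × Int × String))
    (h : (entries.map Prod.fst).Nodup) (d : PySem.Dict String (Int × String)) (s : String) :
    (entries.foldl pvUpd d).get? s = pvOMin (d.get? s) (List.lookup s entries) := by
  induction entries generalizing d with
  | nil => simp [pvOMin_none_right]
  | cons e rest ih =>
      simp only [List.map_cons, List.nodup_cons] at h
      simp only [List.foldl_cons, ih h.2, pvUpd_get, List.lookup]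
      by_cases hs : s = e.1
      · have hl : List.lookup e.1 rest = none := pvLookup_eq_none _ _ h.1
        simp [hs, hl, pvOMin_none_right]
      · simp [hs, (by simp [hs] : (s == e.1) = false)]

theorem pvFoldStep_get (l : List String) (d : PySem.Dict String (Int × String)) (s : String) :
    ((l.foldl pvStep d).get? s)
      = l.foldl (fun acc t => pvOMin acc (List.lookup s (pvIndex (PySem.Str.lower t)))) (d.get? s) := by
  induction l generalizing d with
  | nil => rfl
  | cons t r ih =>
      simp only [List.foldl_cons, ih, pvStep,
        pvFoldUpd_get _ (pvIndex_keys_nodup _) d s]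

theorem pvFoldOMin_eq {α : Type} (f : α → Option (Int × String)) (l : List α) (a : Option (Int × String)) :
    l.foldl (fun acc t => pvOMin acc (f t)) a
      = pvOMin a (l.foldl (fun acc t => pvOMin acc (f t)) none) := by
  induction l generalizing a with
  | nil => simp [pvOMin_none_right]
  | cons t r ih =>
      simp only [List.foldl_cons]
      rw [ih (pvOMin a (f t)), ih (pvOMin none (f t)), pvOMin_assoc]
      rfl

theorem pvM_cons {α : Type} (f : α → Option (Int × String)) (t : α) (r : List α) :
    (t :: r).foldl (fun acc t => pvOMin acc (f t)) none
      = pvOMin (f t) (r.foldl (fun acc t => pvOMin acc (f t)) none) := by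
  simp only [List.foldl_cons]
  rw [pvFoldOMin_eq]
  rfl
theorem pvLookB (t : String) : List.lookup "backend" (pvIndex t) =
    (if ["python","fastapi","flask","django","uvicorn"].contains t then some ((0:Int), "py")
    else if ["node","nodejs","express","nestjs"].contains t then some (1, "js")
    else if ["typescript","ts-node"].contains t then some (2, "ts")
    else if ["java","spring","springboot"].contains t then some (3, "java")
    else if ["c#","csharp","dotnet",".net","asp.net"].contains t then some (4, "cs")
    else if ["go","golang","gin","fiber"].contains t then some (5, "go")
    else if ["php","laravel","symfony"].contains t then some (6, "php")
    else if ["ruby","rails","sinatra"].contains t then some (7, "rb")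
    else none) := by
  unfold pvIndex
  split <;> first | rfl | decide | simp_all
theorem pvLookF (t : String) : List.lookup "frontend" (pvIndex t) =
    (if ["react","next","nextjs"].contains t then some ((0:Int), "jsx")
    else if ["vue","vuejs","nuxt"].contains t then some (1, "vue")
    else if ["angular","ng"].contains t then some (2, "ts")
    else if ["svelte","sveltekit"].contains t then some (3, "svelte")
    else if ["typescript","ts"].contains t then some (4, "ts")
    else if ["javascript","js","vanilla"].contains t then some (5, "js")
    else if ["html","css","static"].contains t then some (6, "html")
    else none) := by
  unfold pvIndex
  split <;> first | rfl | decide | simp_all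

theorem pvLookD (t : String) : List.lookup "design" (pvIndex t) =
    (if ["scss","sass"].contains t then some ((0:Int), "scss")
    else if ["less"].contains t then some (1, "less")
    else if ["stylus"].contains t then some (2, "styl")
    else if ["tailwind","tailwindcss"].contains t then some (3, "css")
    else none) := by
  unfold pvIndex
  split <;> first | rfl | decide | simp_all

theorem pvLookM (t : String) : List.lookup "mobile" (pvIndex t) =
    (if ["react native","expo"].contains t then some ((0:Int), "jsx")
    else if ["flutter","dart"].contains t then some (1, "dart")
    else if ["kotlin","android"].contains t then some (2, "kt")
    else if ["swift","ios"].contains t then some (3, "swift")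
    else none) := by
  unfold pvIndex
  split <;> first | rfl | decide | simp_all

theorem pvLookTA (t : String) : List.lookup "ts_any" (pvIndex t) =
    (if ["typescript","ts"].contains t then some ((0:Int), "") else none) := by
  unfold pvIndex
  split <;> first | rfl | decide | simp_all

theorem pvLookTS (t : String) : List.lookup "ts_strict" (pvIndex t) =
    (if ["typescript"].contains t then some ((0:Int), "") else none) := by
  unfold pvIndex
  split <;> first | rfl | decide | simp_all
theorem pvAnyIn_nil (kws : List String) : pvAnyIn kws [] = false := by simp [pvAnyIn]
theorem pvAnyIn_cons (kws : List String) (t : String) (r : List String) :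
    pvAnyIn kws (t :: r) = (kws.contains t || pvAnyIn kws r) := by
  rw [Bool.eq_iff_iff]
  simp [pvAnyIn, List.contains_cons]
  constructor
  · rintro ⟨k, hk, h | h⟩
    · left; rwa [← h]
    · right; exact ⟨k, hk, h⟩
  · rintro (h | ⟨k, hk, h⟩)
    · exact ⟨t, h, Or.inl rfl⟩
    · exact ⟨k, hk, Or.inr h⟩

def pvCasc : List Bool → List (Int × String) → Option (Int × String)
  | b :: bs, v :: vs => if b then some v else pvCasc bs vs
  | _, _ => none

theorem pvCasc_mem {bs : List Bool} {vs : List (Int × String)} {w : Int × String}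
    (h : pvCasc bs vs = some w) : w ∈ vs := by
  induction bs generalizing vs with
  | nil => simp [pvCasc] at h
  | cons b bs ih =>
      cases vs with
      | nil => simp [pvCasc] at h
      | cons v vs =>
          simp only [pvCasc] at h
          split_ifs at h with hb
          · simp at h; simp [h]
          · exact List.mem_cons_of_mem _ (ih h)

theorem pvOMin_casc (vs : List (Int × String)) (h : vs.Pairwise (fun a b => a.1 < b.1)) :
    ∀ (bs cs : List Bool), bs.length = vs.length → cs.length = vs.length →
      pvOMin (pvCasc bs vs) (pvCasc cs vs) = pvCasc (List.zipWith (· || ·) bs cs) vs := by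
  induction vs with
  | nil => intro bs cs hb hc; simp at hb hc; simp [hb, hc, pvCasc, pvOMin]
  | cons v vs ih =>
      intro bs cs hb hc
      cases bs with
      | nil => simp at hb
      | cons b bs =>
        cases cs with
        | nil => simp at hc
        | cons c cs =>
          simp at hb hc
          rw [List.pairwise_cons] at h
          cases b with
          | false =>
            cases c with
            | false =>
                simp only [pvCasc, List.zipWith, Bool.false_or, Bool.false_eq_true, if_false]
                exact ih h.2 bs cs hb hc
            | true =>
                simp only [pvCasc, List.zipWith, Bool.false_or, Bool.false_eq_true, if_false, if_true]
                cases hw : pvCasc bs vs with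
                | none => rfl
                | some w =>
                    have hlt := h.1 w (pvCasc_mem hw)
                    simp [pvOMin, hlt]
          | true =>
            cases c with
            | false =>
                simp only [pvCasc, List.zipWith, Bool.true_or, if_true]
                cases hw : pvCasc cs vs with
                | none => rfl
                | some w =>
                    have hlt := h.1 w (pvCasc_mem hw)
                    simp [pvOMin, show ¬ w.1 < v.1 by omega]
            | true => simp [pvCasc, pvOMin]

def pvBestB (tsl : List String) : Option (Int × String) :=
  if pvAnyIn ["python","fastapi","flask","django","uvicorn"] tsl then some (0, "py")
  else if pvAnyIn ["node","nodejs","express","nestjs"] tsl then some (1, "js")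
  else if pvAnyIn ["typescript","ts-node"] tsl then some (2, "ts")
  else if pvAnyIn ["java","spring","springboot"] tsl then some (3, "java")
  else if pvAnyIn ["c#","csharp","dotnet",".net","asp.net"] tsl then some (4, "cs")
  else if pvAnyIn ["go","golang","gin","fiber"] tsl then some (5, "go")
  else if pvAnyIn ["php","laravel","symfony"] tsl then some (6, "php")
  else if pvAnyIn ["ruby","rails","sinatra"] tsl then some (7, "rb")
  else none

set_option maxHeartbeats 1000000 in
theorem pvMB (tsl : List String) :
    tsl.foldl (fun acc t => pvOMin acc (List.lookup "backend" (pvIndex t))) none = pvBestB tsl := by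
  induction tsl with
  | nil => simp [pvBestB, pvAnyIn_nil]
  | cons t r ih =>
      rw [pvM_cons, ih, pvLookB]
      clear ih
      show pvOMin
        (pvCasc [["python","fastapi","flask","django","uvicorn"].contains t,
          ["node","nodejs","express","nestjs"].contains t,
          ["typescript","ts-node"].contains t,
          ["java","spring","springboot"].contains t,
          ["c#","csharp","dotnet",".net","asp.net"].contains t,
          ["go","golang","gin","fiber"].contains t,
          ["php","laravel","symfony"].contains t,
          ["ruby","rails","sinatra"].contains t]
          [(0,"py"),(1,"js"),(2,"ts"),(3,"java"),(4,"cs"),(5,"go"),(6,"php"),(7,"rb")])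
        (pvCasc [pvAnyIn ["python","fastapi","flask","django","uvicorn"] r,
          pvAnyIn ["node","nodejs","express","nestjs"] r,
          pvAnyIn ["typescript","ts-node"] r,
          pvAnyIn ["java","spring","springboot"] r,
          pvAnyIn ["c#","csharp","dotnet",".net","asp.net"] r,
          pvAnyIn ["go","golang","gin","fiber"] r,
          pvAnyIn ["php","laravel","symfony"] r,
          pvAnyIn ["ruby","rails","sinatra"] r]
          [(0,"py"),(1,"js"),(2,"ts"),(3,"java"),(4,"cs"),(5,"go"),(6,"php"),(7,"rb")])
        = pvBestB (t :: r)
      rw [pvOMin_casc _ (by decide) _ _ rfl rfl]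
      simp only [List.zipWith, pvBestB, pvAnyIn_cons, pvCasc]

def pvBestF (tsl : List String) : Option (Int × String) :=
  if pvAnyIn ["react","next","nextjs"] tsl then some (0,"jsx")
  else if pvAnyIn ["vue","vuejs","nuxt"] tsl then some (1,"vue")
  else if pvAnyIn ["angular","ng"] tsl then some (2,"ts")
  else if pvAnyIn ["svelte","sveltekit"] tsl then some (3,"svelte")
  else if pvAnyIn ["typescript","ts"] tsl then some (4,"ts")
  else if pvAnyIn ["javascript","js","vanilla"] tsl then some (5,"js")
  else if pvAnyIn ["html","css","static"] tsl then some (6,"html")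
  else none

theorem pvMF (tsl : List String) :
    tsl.foldl (fun acc t => pvOMin acc (List.lookup "frontend" (pvIndex t))) none = pvBestF tsl := by
  induction tsl with
  | nil => simp [pvBestF, pvAnyIn_nil]
  | cons t r ih =>
      rw [pvM_cons, ih, pvLookF]
      clear ih
      show pvOMin
        (pvCasc [["react","next","nextjs"].contains t,
          ["vue","vuejs","nuxt"].contains t,
          ["angular","ng"].contains t,
          ["svelte","sveltekit"].contains t,
          ["typescript","ts"].contains t,
          ["javascript","js","vanilla"].contains t,
          ["html","css","static"].contains t]
          [(0,"jsx"),(1,"vue"),(2,"ts"),(3,"svelte"),(4,"ts"),(5,"js"),(6,"html")])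
        (pvCasc [pvAnyIn ["react","next","nextjs"] r,
          pvAnyIn ["vue","vuejs","nuxt"] r,
          pvAnyIn ["angular","ng"] r,
          pvAnyIn ["svelte","sveltekit"] r,
          pvAnyIn ["typescript","ts"] r,
          pvAnyIn ["javascript","js","vanilla"] r,
          pvAnyIn ["html","css","static"] r]
          [(0,"jsx"),(1,"vue"),(2,"ts"),(3,"svelte"),(4,"ts"),(5,"js"),(6,"html")])
        = pvBestF (t :: r)
      rw [pvOMin_casc _ (by decide) _ _ rfl rfl]
      simp only [List.zipWith, pvBestF, pvAnyIn_cons, pvCasc]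

def pvBestD (tsl : List String) : Option (Int × String) :=
  if pvAnyIn ["scss","sass"] tsl then some (0,"scss")
  else if pvAnyIn ["less"] tsl then some (1,"less")
  else if pvAnyIn ["stylus"] tsl then some (2,"styl")
  else if pvAnyIn ["tailwind","tailwindcss"] tsl then some (3,"css")
  else none

theorem pvMD (tsl : List String) :
    tsl.foldl (fun acc t => pvOMin acc (List.lookup "design" (pvIndex t))) none = pvBestD tsl := by
  induction tsl with
  | nil => simp [pvBestD, pvAnyIn_nil]
  | cons t r ih =>
      rw [pvM_cons, ih, pvLookD]
      clear ih
      show pvOMin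
        (pvCasc [["scss","sass"].contains t,
          ["less"].contains t,
          ["stylus"].contains t,
          ["tailwind","tailwindcss"].contains t]
          [(0,"scss"),(1,"less"),(2,"styl"),(3,"css")])
        (pvCasc [pvAnyIn ["scss","sass"] r,
          pvAnyIn ["less"] r,
          pvAnyIn ["stylus"] r,
          pvAnyIn ["tailwind","tailwindcss"] r]
          [(0,"scss"),(1,"less"),(2,"styl"),(3,"css")])
        = pvBestD (t :: r)
      rw [pvOMin_casc _ (by decide) _ _ rfl rfl]
      simp only [List.zipWith, pvBestD, pvAnyIn_cons, pvCasc]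

def pvBestM (tsl : List String) : Option (Int × String) :=
  if pvAnyIn ["react native","expo"] tsl then some (0,"jsx")
  else if pvAnyIn ["flutter","dart"] tsl then some (1,"dart")
  else if pvAnyIn ["kotlin","android"] tsl then some (2,"kt")
  else if pvAnyIn ["swift","ios"] tsl then some (3,"swift")
  else none

theorem pvMM (tsl : List String) :
    tsl.foldl (fun acc t => pvOMin acc (List.lookup "mobile" (pvIndex t))) none = pvBestM tsl := by
  induction tsl with
  | nil => simp [pvBestM, pvAnyIn_nil]
  | cons t r ih =>
      rw [pvM_cons, ih, pvLookM]
      clear ih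
      show pvOMin
        (pvCasc [["react native","expo"].contains t,
          ["flutter","dart"].contains t,
          ["kotlin","android"].contains t,
          ["swift","ios"].contains t]
          [(0,"jsx"),(1,"dart"),(2,"kt"),(3,"swift")])
        (pvCasc [pvAnyIn ["react native","expo"] r,
          pvAnyIn ["flutter","dart"] r,
          pvAnyIn ["kotlin","android"] r,
          pvAnyIn ["swift","ios"] r]
          [(0,"jsx"),(1,"dart"),(2,"kt"),(3,"swift")])
        = pvBestM (t :: r)
      rw [pvOMin_casc _ (by decide) _ _ rfl rfl]
      simp only [List.zipWith, pvBestM, pvAnyIn_cons, pvCasc]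

def pvBestTA (tsl : List String) : Option (Int × String) :=
  if pvAnyIn ["typescript","ts"] tsl then some (0,"")
  else none

theorem pvMTA (tsl : List String) :
    tsl.foldl (fun acc t => pvOMin acc (List.lookup "ts_any" (pvIndex t))) none = pvBestTA tsl := by
  induction tsl with
  | nil => simp [pvBestTA, pvAnyIn_nil]
  | cons t r ih =>
      rw [pvM_cons, ih, pvLookTA]
      clear ih
      show pvOMin
        (pvCasc [["typescript","ts"].contains t]
          [(0,"")])
        (pvCasc [pvAnyIn ["typescript","ts"] r]
          [(0,"")])
        = pvBestTA (t :: r)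
      rw [pvOMin_casc _ (by decide) _ _ rfl rfl]
      simp only [List.zipWith, pvBestTA, pvAnyIn_cons, pvCasc]

def pvBestTS (tsl : List String) : Option (Int × String) :=
  if pvAnyIn ["typescript"] tsl then some (0,"")
  else none

theorem pvMTS (tsl : List String) :
    tsl.foldl (fun acc t => pvOMin acc (List.lookup "ts_strict" (pvIndex t))) none = pvBestTS tsl := by
  induction tsl with
  | nil => simp [pvBestTS, pvAnyIn_nil]
  | cons t r ih =>
      rw [pvM_cons, ih, pvLookTS]
      clear ih
      show pvOMin
        (pvCasc [["typescript"].contains t]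
          [(0,"")])
        (pvCasc [pvAnyIn ["typescript"] r]
          [(0,"")])
        = pvBestTS (t :: r)
      rw [pvOMin_casc _ (by decide) _ _ rfl rfl]
      simp only [List.zipWith, pvBestTS, pvAnyIn_cons, pvCasc]

-- ===== A-side reduction: canonical dict shape and cascade collapse =====
def pvD (b f g : String) : PySem.Dict String String :=
  PySem.Dict.mk [("backend", b), ("frontend", f), ("design", g), ("middleware", b)]

theorem pv0 : (PySem.Dict.ofList [("backend", "py"), ("frontend", "js"), ("design", "css"), ("middleware", "py")] : PySem.Dict String String) = pvD "py" "js" "css" := by decide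

theorem insF (b f g x : String) : (pvD b f g).insert "frontend" x = pvD b x g := by
  simp [pvD, PySem.Dict.insert]

theorem insG (b f g x : String) : (pvD b f g).insert "design" x = pvD b f x := by
  simp [pvD, PySem.Dict.insert]

theorem itemsD (b f g : String) : (pvD b f g).items = [("backend", b), ("frontend", f), ("design", g), ("middleware", b)] := rfl

theorem secB (c1 c2 c3 c4 c5 c6 c7 c8 : Bool) :
    (if c1 then ((pvD "py" "js" "css").insert "backend" "py").insert "middleware" "py"
     else if c2 then ((pvD "py" "js" "css").insert "backend" "js").insert "middleware" "js"
     else if c3 then ((pvD "py" "js" "css").insert "backend" "ts").insert "middleware" "ts"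
     else if c4 then ((pvD "py" "js" "css").insert "backend" "java").insert "middleware" "java"
     else if c5 then ((pvD "py" "js" "css").insert "backend" "cs").insert "middleware" "cs"
     else if c6 then ((pvD "py" "js" "css").insert "backend" "go").insert "middleware" "go"
     else if c7 then ((pvD "py" "js" "css").insert "backend" "php").insert "middleware" "php"
     else if c8 then ((pvD "py" "js" "css").insert "backend" "rb").insert "middleware" "rb"
     else pvD "py" "js" "css")
    = pvD (if c1 then "py" else if c2 then "js" else if c3 then "ts" else if c4 then "java"
           else if c5 then "cs" else if c6 then "go" else if c7 then "php" else if c8 then "rb"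
           else "py") "js" "css" := by
  split_ifs <;> decide

theorem secF (b : String) (c1 ct c2 c3 c4 c5 c6 c7 : Bool) :
    (if c1 then
       (if ct then (pvD b "js" "css").insert "frontend" "tsx"
        else (pvD b "js" "css").insert "frontend" "jsx")
     else if c2 then (pvD b "js" "css").insert "frontend" "vue"
     else if c3 then (pvD b "js" "css").insert "frontend" "ts"
     else if c4 then (pvD b "js" "css").insert "frontend" "svelte"
     else if c5 then (pvD b "js" "css").insert "frontend" "ts"
     else if c6 then (pvD b "js" "css").insert "frontend" "js"
     else if c7 then (pvD b "js" "css").insert "frontend" "html"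
     else pvD b "js" "css")
    = pvD b (if c1 then (if ct then "tsx" else "jsx") else if c2 then "vue" else if c3 then "ts"
             else if c4 then "svelte" else if c5 then "ts" else if c6 then "js"
             else if c7 then "html" else "js") "css" := by
  split_ifs <;> simp [insF]

theorem secG (b f : String) (c1 c2 c3 c4 : Bool) :
    (if c1 then (pvD b f "css").insert "design" "scss"
     else if c2 then (pvD b f "css").insert "design" "less"
     else if c3 then (pvD b f "css").insert "design" "styl"
     else if c4 then (pvD b f "css").insert "design" "css"
     else pvD b f "css")
    = pvD b f (if c1 then "scss" else if c2 then "less" else if c3 then "styl"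
               else if c4 then "css" else "css") := by
  split_ifs <;> simp [insG]

theorem secM (b f g : String) (c1 ct c2 c3 c4 : Bool) :
    (if c1 then (pvD b f g).insert "frontend" (if ct then "tsx" else "jsx")
     else if c2 then (pvD b f g).insert "frontend" "dart"
     else if c3 then (pvD b f g).insert "frontend" "kt"
     else if c4 then (pvD b f g).insert "frontend" "swift"
     else pvD b f g)
    = pvD b (if c1 then (if ct then "tsx" else "jsx") else if c2 then "dart"
             else if c3 then "kt" else if c4 then "swift" else f) g := by
  split_ifs <;> simp [insF]

-- ===== B-side resolution of the per-section arg-min into A's cascades =====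
theorem resB (tsl : List String) :
    (match pvBestB tsl with
     | some pe => pe.2
     | none => "py")
    = (if pvAnyIn ["python","fastapi","flask","django","uvicorn"] tsl then "py"
       else if pvAnyIn ["node","nodejs","express","nestjs"] tsl then "js"
       else if pvAnyIn ["typescript","ts-node"] tsl then "ts"
       else if pvAnyIn ["java","spring","springboot"] tsl then "java"
       else if pvAnyIn ["c#","csharp","dotnet",".net","asp.net"] tsl then "cs"
       else if pvAnyIn ["go","golang","gin","fiber"] tsl then "go"
       else if pvAnyIn ["php","laravel","symfony"] tsl then "php"
       else if pvAnyIn ["ruby","rails","sinatra"] tsl then "rb"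
       else "py") := by
  unfold pvBestB; split_ifs <;> rfl

theorem resF (tsl : List String) :
    (match pvBestF tsl with
     | some pe => if pe.1 == 0 then (if (pvBestTA tsl).isSome then "tsx" else "jsx") else pe.2
     | none => "js")
    = (if pvAnyIn ["react","next","nextjs"] tsl then
         (if pvAnyIn ["typescript","ts"] tsl then "tsx" else "jsx")
       else if pvAnyIn ["vue","vuejs","nuxt"] tsl then "vue"
       else if pvAnyIn ["angular","ng"] tsl then "ts"
       else if pvAnyIn ["svelte","sveltekit"] tsl then "svelte"
       else if pvAnyIn ["typescript","ts"] tsl then "ts"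
       else if pvAnyIn ["javascript","js","vanilla"] tsl then "js"
       else if pvAnyIn ["html","css","static"] tsl then "html"
       else "js") := by
  unfold pvBestF pvBestTA; split_ifs <;> first | rfl | simp_all

theorem resD (tsl : List String) :
    (match pvBestD tsl with
     | some pe => pe.2
     | none => "css")
    = (if pvAnyIn ["scss","sass"] tsl then "scss"
       else if pvAnyIn ["less"] tsl then "less"
       else if pvAnyIn ["stylus"] tsl then "styl"
       else if pvAnyIn ["tailwind","tailwindcss"] tsl then "css"
       else "css") := by
  unfold pvBestD; split_ifs <;> rfl

theorem resM (tsl : List String) (f0 : String) :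
    (match pvBestM tsl with
     | some pe => if pe.1 == 0 then (if (pvBestTS tsl).isSome then "tsx" else "jsx") else pe.2
     | none => f0)
    = (if pvAnyIn ["react native","expo"] tsl then
         (if tsl.contains "typescript" then "tsx" else "jsx")
       else if pvAnyIn ["flutter","dart"] tsl then "dart"
       else if pvAnyIn ["kotlin","android"] tsl then "kt"
       else if pvAnyIn ["swift","ios"] tsl then "swift"
       else f0) := by
  have hts : pvAnyIn ["typescript"] tsl = tsl.contains "typescript" := by
    simp [pvAnyIn]
  unfold pvBestM pvBestTS
  rw [hts]
  split_ifs <;> first | rfl | simp_all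

-- the same characterizations, phrased over the original tech_stack fold
theorem pvMB' (ts : List String) :
    ts.foldl (fun acc t => pvOMin acc (List.lookup "backend" (pvIndex (PySem.Str.lower t)))) none
      = pvBestB (ts.map PySem.Str.lower) := by
  rw [← pvMB, List.foldl_map]

theorem pvMF' (ts : List String) :
    ts.foldl (fun acc t => pvOMin acc (List.lookup "frontend" (pvIndex (PySem.Str.lower t)))) none
      = pvBestF (ts.map PySem.Str.lower) := by
  rw [← pvMF, List.foldl_map]

theorem pvMD' (ts : List String) :
    ts.foldl (fun acc t => pvOMin acc (List.lookup "design" (pvIndex (PySem.Str.lower t)))) none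
      = pvBestD (ts.map PySem.Str.lower) := by
  rw [← pvMD, List.foldl_map]

theorem pvMM' (ts : List String) :
    ts.foldl (fun acc t => pvOMin acc (List.lookup "mobile" (pvIndex (PySem.Str.lower t)))) none
      = pvBestM (ts.map PySem.Str.lower) := by
  rw [← pvMM, List.foldl_map]

theorem pvMTA' (ts : List String) :
    ts.foldl (fun acc t => pvOMin acc (List.lookup "ts_any" (pvIndex (PySem.Str.lower t)))) none
      = pvBestTA (ts.map PySem.Str.lower) := by
  rw [← pvMTA, List.foldl_map]

theorem pvMTS' (ts : List String) :
    ts.foldl (fun acc t => pvOMin acc (List.lookup "ts_strict" (pvIndex (PySem.Str.lower t)))) none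
      = pvBestTS (ts.map PySem.Str.lower) := by
  rw [← pvMTS, List.foldl_map]

theorem pvFinalEq (pd : String) (ts : List String) :
    get_extension_mapping_py pd ts = get_extension_mapping_py_alt pd ts := by
  unfold get_extension_mapping_py get_extension_mapping_py_alt
  have hemp : ∀ s : String, (PySem.Dict.mk ([] : List (String × Int × String))).get? s = none := fun _ => rfl
  simp only [pvFoldStep_get, hemp, pvMB', pvMF', pvMD', pvMM', pvMTA', pvMTS', pv0]
  rw [secB, secF, secG]
  by_cases hm : PySem.Str.isIn "mobile" (PySem.Str.lower pd) = true
  · simp only [hm, if_true]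
    rw [secM, itemsD, resB, resD, resM, resF]
  · simp only [Bool.not_eq_true] at hm
    simp only [hm, Bool.false_eq_true, if_false]
    rw [itemsD, resB, resD, resF]

-- ===== VERDICT (by name: the statement is the Claim_ definition above) =====
theorem get_extension_mapping_py_spec : Claim_equal_get_extension_mapping_py := by
  intro pd ts _
  unfold Spec_get_extension_mapping_py
  exact pvFinalEq pd ts
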